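-- pv_equiv track=rewrite | github.com/georgezhang2232/Artificial-Intelligence | mp2/geometry.py | isArmWithinWindow
-- ===== SOURCE A (Python) =====
-- def isArmWithinWindow(armPos, window):
--     """Determine whether the given arm stays in the window
--
--         Args:
--             armPos (list): start and end positions of all arm links [(start, end)]
--             window (tuple): (width, height) of the window
--
--         Return:
--             True if all parts are in the window. False if not.
--     """
--     for arm in armPos:
--         width, height = window
--         start = arm[0]
--         end = arm[1]
--         x1, y1 = start
--         x2, y2 = end
--         if (x1 > width or x1 < 0) or (y1 > height or y1 < 0) or (x2 > width or x2 < 0) or (y2 > height or y2 < 0):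
--             return False
--     return True
-- ===== SOURCE B (Python) =====
-- def isArmWithinWindow(armPos, window):
--     if not armPos:
--         return True
--     width, height = window
--     xs = [pt[0] for arm in armPos for pt in arm]
--     ys = [pt[1] for arm in armPos for pt in arm]
--     return min(xs) >= 0 and max(xs) <= width and min(ys) >= 0 and max(ys) <= height
-- ===== Notes on version B (the rewrite author's own statement) =====
-- stated objective: alternative
-- what changed: Replaces the per-link short-circuiting loop with a gather-then-reduce: flatten all endpoint coordinates into xs/ys lists and compare their min/max against the window bounds.
import Mathlib
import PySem

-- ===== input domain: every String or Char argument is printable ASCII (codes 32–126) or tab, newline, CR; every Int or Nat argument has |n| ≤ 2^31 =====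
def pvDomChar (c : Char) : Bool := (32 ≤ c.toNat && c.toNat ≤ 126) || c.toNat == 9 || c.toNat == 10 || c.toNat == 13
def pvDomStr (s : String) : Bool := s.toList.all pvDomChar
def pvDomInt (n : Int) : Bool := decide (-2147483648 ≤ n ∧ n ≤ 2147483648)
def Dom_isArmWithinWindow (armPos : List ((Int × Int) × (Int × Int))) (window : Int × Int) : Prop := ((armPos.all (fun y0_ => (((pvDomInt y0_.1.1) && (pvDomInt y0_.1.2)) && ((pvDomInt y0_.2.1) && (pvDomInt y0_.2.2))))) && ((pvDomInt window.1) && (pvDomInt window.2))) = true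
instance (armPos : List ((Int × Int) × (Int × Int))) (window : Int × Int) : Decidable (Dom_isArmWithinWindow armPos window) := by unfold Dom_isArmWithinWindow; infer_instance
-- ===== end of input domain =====

-- B gathers all endpoint coordinates and reduces with min/max instead of A's per-link short-circuit loop (alternative decomposition).
-- ===== PORT A =====
def isArmWithinWindow (armPos : List ((Int × Int) × (Int × Int))) (window : Int × Int) : Bool :=
  match armPos with
  | [] => true
  | arm :: rest =>
    let width := window.1
    let height := window.2
    let start := arm.1
    let «end» := arm.2
    let x1 := start.1; let y1 := start.2
    let x2 := «end».1; let y2 := «end».2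
    if (x1 > width || x1 < 0) || (y1 > height || y1 < 0) || (x2 > width || x2 < 0) || (y2 > height || y2 < 0) then
      false
    else
      isArmWithinWindow rest window

-- ===== PORT B =====
def isArmWithinWindow_alt (armPos : List ((Int × Int) × (Int × Int))) (window : Int × Int) : Bool :=
  match armPos with
  | [] => true
  | _ =>
    let width := window.1
    let height := window.2
    let xs := armPos.flatMap (fun arm => [arm.1.1, arm.2.1])
    let ys := armPos.flatMap (fun arm => [arm.1.2, arm.2.2])
    -- Python's min/max of a nonempty list = foldl over the tail starting at the head
    match xs, ys with
    | x0 :: xt, y0 :: yt =>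
      decide (xt.foldl min x0 ≥ 0) && decide (xt.foldl max x0 ≤ width) &&
      decide (yt.foldl min y0 ≥ 0) && decide (yt.foldl max y0 ≤ height)
    | _, _ => true

-- ===== PRECONDITION & SPEC =====
def Spec_isArmWithinWindow (armPos : List ((Int × Int) × (Int × Int))) (window : Int × Int) (out : Bool) : Prop := out = isArmWithinWindow_alt armPos window
instance (armPos : List ((Int × Int) × (Int × Int))) (window : Int × Int) (out : Bool) : Decidable (Spec_isArmWithinWindow armPos window out) := by unfold Spec_isArmWithinWindow; infer_instance

-- ===== CLAIM (what is proved, stated in full; the proofs are below) =====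
def Claim_equal_isArmWithinWindow : Prop := ∀ (armPos : List ((Int × Int) × (Int × Int))) (window : Int × Int), Dom_isArmWithinWindow armPos window → Spec_isArmWithinWindow armPos window (isArmWithinWindow armPos window)

-- ===== LEMMAS AND PROOFS =====
lemma le_foldl_min_iff (c : Int) : ∀ (t : List Int) (h : Int),
    (c ≤ t.foldl min h) ↔ (c ≤ h ∧ ∀ x ∈ t, c ≤ x) := by
  intro t
  induction t with
  | nil => simp
  | cons a t ih =>
    intro h
    simp [List.foldl, ih]
    tauto

lemma foldl_max_le_iff (c : Int) : ∀ (t : List Int) (h : Int),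
    (t.foldl max h ≤ c) ↔ (h ≤ c ∧ ∀ x ∈ t, x ≤ c) := by
  intro t
  induction t with
  | nil => simp
  | cons a t ih =>
    intro h
    simp [List.foldl, ih]
    tauto

def inWin (w h : Int) (arm : (Int × Int) × (Int × Int)) : Bool :=
  decide ((0 ≤ arm.1.1 ∧ arm.1.1 ≤ w) ∧ (0 ≤ arm.1.2 ∧ arm.1.2 ≤ h) ∧
    (0 ≤ arm.2.1 ∧ arm.2.1 ≤ w) ∧ (0 ≤ arm.2.2 ∧ arm.2.2 ≤ h))

lemma A_eq (window : Int × Int) : ∀ (armPos : List ((Int × Int) × (Int × Int))),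
    isArmWithinWindow armPos window = armPos.all (inWin window.1 window.2) := by
  intro armPos
  induction armPos with
  | nil => simp [isArmWithinWindow]
  | cons a rest ih =>
    simp only [isArmWithinWindow, ih, List.all_cons]
    by_cases hin : inWin window.1 window.2 a = true
    · have : ¬ ((a.1.1 > window.1 || a.1.1 < 0) || (a.1.2 > window.2 || a.1.2 < 0) ||
          (a.2.1 > window.1 || a.2.1 < 0) || (a.2.2 > window.2 || a.2.2 < 0)) = true := by
        simp [inWin] at hin ⊢
        omega
      simp [this, hin]
    · have : ((a.1.1 > window.1 || a.1.1 < 0) || (a.1.2 > window.2 || a.1.2 < 0) ||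
          (a.2.1 > window.1 || a.2.1 < 0) || (a.2.2 > window.2 || a.2.2 < 0)) = true := by
        simp [inWin] at hin ⊢
        omega
      simp [this, hin]

lemma B_eq (window : Int × Int) : ∀ (armPos : List ((Int × Int) × (Int × Int))),
    isArmWithinWindow_alt armPos window = armPos.all (inWin window.1 window.2) := by
  intro armPos
  match armPos with
  | [] => simp [isArmWithinWindow_alt]
  | a :: rest =>
    simp only [isArmWithinWindow_alt, List.flatMap_cons, List.cons_append, List.nil_append]
    rw [show ∀ (b1 b2 b3 b4 : Bool), (b1 && b2 && b3 && b4) = (b1 && (b2 && (b3 && b4))) from by decide]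
    simp only [← Bool.decide_and]
    have hall : ∀ p : ((Int × Int) × (Int × Int)) → Bool,
        (a :: rest).all p = decide (∀ arm ∈ a :: rest, p arm = true) := by
      intro p
      rw [Bool.eq_iff_iff]
      simp
    rw [hall]
    rw [decide_eq_decide]
    rw [ge_iff_le, le_foldl_min_iff, foldl_max_le_iff, ge_iff_le, le_foldl_min_iff, foldl_max_le_iff]
    simp only [List.mem_cons, List.mem_flatMap, List.not_mem_nil, or_false, inWin, decide_eq_true_eq]
    constructor
    · rintro ⟨⟨h1, h2⟩, ⟨h3, h4⟩, ⟨h5, h6⟩, h7, h8⟩ arm harm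
      rcases harm with rfl | harm
      · exact ⟨⟨h1, h3⟩, ⟨h5, h7⟩, ⟨h2 _ (Or.inl rfl), h4 _ (Or.inl rfl)⟩,
          h6 _ (Or.inl rfl), h8 _ (Or.inl rfl)⟩
      · refine ⟨⟨?_, ?_⟩, ⟨?_, ?_⟩, ⟨?_, ?_⟩, ?_, ?_⟩
        · exact h2 _ (Or.inr ⟨arm, harm, Or.inl rfl⟩)
        · exact h4 _ (Or.inr ⟨arm, harm, Or.inl rfl⟩)
        · exact h6 _ (Or.inr ⟨arm, harm, Or.inl rfl⟩)
        · exact h8 _ (Or.inr ⟨arm, harm, Or.inl rfl⟩)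
        · exact h2 _ (Or.inr ⟨arm, harm, Or.inr rfl⟩)
        · exact h4 _ (Or.inr ⟨arm, harm, Or.inr rfl⟩)
        · exact h6 _ (Or.inr ⟨arm, harm, Or.inr rfl⟩)
        · exact h8 _ (Or.inr ⟨arm, harm, Or.inr rfl⟩)
    · intro h
      have ha := h a (Or.inl rfl)
      refine ⟨⟨ha.1.1, ?_⟩, ⟨ha.1.2, ?_⟩, ⟨ha.2.1.1, ?_⟩, ha.2.1.2, ?_⟩ <;>
        rintro x (rfl | ⟨arm, harm, rfl | rfl⟩)
      · exact ha.2.2.1.1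
      · exact (h arm (Or.inr harm)).1.1
      · exact (h arm (Or.inr harm)).2.2.1.1
      · exact ha.2.2.1.2
      · exact (h arm (Or.inr harm)).1.2
      · exact (h arm (Or.inr harm)).2.2.1.2
      · exact ha.2.2.2.1
      · exact (h arm (Or.inr harm)).2.1.1
      · exact (h arm (Or.inr harm)).2.2.2.1
      · exact ha.2.2.2.2
      · exact (h arm (Or.inr harm)).2.1.2
      · exact (h arm (Or.inr harm)).2.2.2.2

-- ===== VERDICT (by name: the statement is the Claim_ definition above) =====
theorem isArmWithinWindow_spec : Claim_equal_isArmWithinWindow := by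
  intro armPos window _
  unfold Spec_isArmWithinWindow
  rw [A_eq, B_eq]
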